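-- pv_equiv track=rewrite | github.com/MartinHeinz/felsenstein-1981 | homework_2.py | get_ordered_leaves
-- ===== SOURCE A (Python) =====
-- def get_ordered_leaves(root, tree):
--     '''
--     :param root: tree root number
--     :param tree: map of nodes (parent) to list of nodes (choldren)
--     :return: list of leaves ordered from left to right
--     '''
--     def subtree_preorder(node):
--         values = tree.get(node, None)
--         if values is None:
--             leaves.append(node)
--         else:
--             for n in values:
--                 subtree_preorder(n)
--
--     leaves = []
--     subtree_preorder(root)
--     return leaves
-- ===== SOURCE B (Python) =====
-- def get_ordered_leaves(root, tree):
--     '''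
--     :param root: tree root number
--     :param tree: map of nodes (parent) to list of nodes (choldren)
--     :return: list of leaves ordered from left to right
--     '''
--     stack = [root]
--     leaves = []
--     while stack:
--         node = stack.pop()
--         values = tree.get(node)
--         if values is None:
--             leaves.append(node)
--         else:
--             stack.extend(reversed(values))
--     return leaves
-- ===== Notes on version B (the rewrite author's own statement) =====
-- stated objective: alternative
-- what changed: The recursive inner helper appending to a shared list is replaced by an iterative preorder traversal with an explicit stack (pop a node, emit it if it has no entry, otherwise push its children reversed), which also avoids Python's recursion-depth limit; Pre_ requires the child map to be acyclic from the root, exactly the inputs where A's unbounded recursion returns.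
import Mathlib
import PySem

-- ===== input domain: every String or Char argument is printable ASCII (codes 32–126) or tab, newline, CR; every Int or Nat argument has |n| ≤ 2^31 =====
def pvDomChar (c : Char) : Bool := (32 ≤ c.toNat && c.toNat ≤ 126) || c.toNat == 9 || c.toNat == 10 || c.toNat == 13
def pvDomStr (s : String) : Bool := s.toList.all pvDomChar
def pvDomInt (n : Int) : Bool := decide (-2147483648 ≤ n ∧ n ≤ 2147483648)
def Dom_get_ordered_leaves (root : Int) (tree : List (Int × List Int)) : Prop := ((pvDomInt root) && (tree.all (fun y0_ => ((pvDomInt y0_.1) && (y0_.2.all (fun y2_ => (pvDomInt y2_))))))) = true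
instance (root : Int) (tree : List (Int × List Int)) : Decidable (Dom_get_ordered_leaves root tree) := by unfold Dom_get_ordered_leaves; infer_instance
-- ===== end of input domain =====

-- B replaces A's recursive helper by an explicit-stack loop (same return value; neither mutates its arguments).


-- ===== PORT A =====
-- A's inner `subtree_preorder(node)`: the shared mutable `leaves` list is threaded as an
-- accumulator; the `for n in values: subtree_preorder(n)` loop is a foldl.  The Nat fuel is
-- only a termination guard (Python has none): Pre_ proves `tree.length + 1` never runs out.
def pvLeavesRec (tree : List (Int × List Int)) : Nat → Int → List Int → List Int
  | 0, _, leaves => leaves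
  | f + 1, node, leaves =>
    match (PySem.Dict.mk tree).get? node with
    | none => leaves ++ [node]
    | some values => values.foldl (fun acc n => pvLeavesRec tree f n acc) leaves

def get_ordered_leaves (root : Int) (tree : List (Int × List Int)) : List Int :=
  pvLeavesRec tree (tree.length + 1) root []

-- ===== PORT B =====
-- Fuel bound for B's while-loop (a termination guard only; Python's loop has none):
-- the number of iterations of B's loop, over-approximated with recursion depth `tree.length + 1`.
def pvCost (tree : List (Int × List Int)) : Nat → Int → Nat
  | 0, _ => 0
  | f + 1, n =>
    match (PySem.Dict.mk tree).get? n with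
    | none => 1
    | some cs => (cs.map (pvCost tree f)).sum + 1

-- B's loop.  The Lean stack holds Python's stack REVERSED (top first), so Python's
-- `stack.pop()` is taking the head and `stack.extend(reversed(values))` is `values ++ rest`.
def pvLeavesLoop (tree : List (Int × List Int)) : Nat → List Int → List Int → List Int
  | 0, _, leaves => leaves
  | _ + 1, [], leaves => leaves
  | f + 1, node :: rest, leaves =>
    match (PySem.Dict.mk tree).get? node with
    | none => pvLeavesLoop tree f rest (leaves ++ [node])
    | some values => pvLeavesLoop tree f (values ++ rest) leaves

def get_ordered_leaves_alt (root : Int) (tree : List (Int × List Int)) : List Int :=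
  pvLeavesLoop tree (pvCost tree (tree.length + 1) root) [root] []

-- ===== PRECONDITION & SPEC =====
def pvSuccs (tree : List (Int × List Int)) (n : Int) : List Int :=
  ((PySem.Dict.mk tree).get? n).getD []

-- nodes reachable from `k` by walks of exactly `i` child-steps
def pvFrontier (tree : List (Int × List Int)) : Nat → Int → List Int
  | 0, k => [k]
  | i + 1, k => ((pvFrontier tree i k).flatMap (pvSuccs tree)).dedup

-- nodes reachable from `root` (any reachable node is at distance ≤ tree.length)
def pvReach (tree : List (Int × List Int)) (root : Int) : List Int :=
  (List.range (tree.length + 1)).flatMap (fun i => pvFrontier tree i root)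

-- Pre_ excludes exactly the inputs where A diverges (Python: RecursionError): child maps with a
-- cycle reachable from the root, stated as: no key reachable from root lies on a cycle of
-- length ≤ tree.length (a shortest cycle is never longer than the number of keys).
def Pre_get_ordered_leaves (root : Int) (tree : List (Int × List Int)) : Prop :=
  ∀ p ∈ tree, p.1 ∈ pvReach tree root →
    ∀ i ∈ List.range tree.length, p.1 ∉ pvFrontier tree (i + 1) p.1

instance (root : Int) (tree : List (Int × List Int)) : Decidable (Pre_get_ordered_leaves root tree) := by
  unfold Pre_get_ordered_leaves; infer_instance

def pvWitness_get_ordered_leaves : Int × (List (Int × List Int)) := (1, [(1, [2, 3]), (2, [])])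

def Spec_get_ordered_leaves (root : Int) (tree : List (Int × List Int)) (out : List Int) : Prop := out = get_ordered_leaves_alt root tree
instance (root : Int) (tree : List (Int × List Int)) (out : List Int) : Decidable (Spec_get_ordered_leaves root tree out) := by unfold Spec_get_ordered_leaves; infer_instance

-- ===== CLAIM (what is proved, stated in full; the proofs are below) =====
def Claim_equal_get_ordered_leaves : Prop := ∀ (root : Int) (tree : List (Int × List Int)), Dom_get_ordered_leaves root tree → Pre_get_ordered_leaves root tree → Spec_get_ordered_leaves root tree (get_ordered_leaves root tree)

-- ===== LEMMAS AND PROOFS =====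

-- `pvOk tree f n = true` iff fuel `f` suffices for A's recursion from `n`.
def pvOk (tree : List (Int × List Int)) : Nat → Int → Bool
  | 0, _ => false
  | f + 1, n =>
    match (PySem.Dict.mk tree).get? n with
    | none => true
    | some cs => cs.all (pvOk tree f)

-- `anc` is the recursion path above `n`, nearest parent first.
def pvChainUp (tree : List (Int × List Int)) : List Int → Int → Prop
  | [], _ => True
  | a :: as, n => n ∈ pvSuccs tree a ∧ pvChainUp tree as a

-- walk a → xs… → b following child edges
def pvWk (tree : List (Int × List Int)) : Int → List Int → Int → Prop
  | a, [], b => b ∈ pvSuccs tree a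
  | a, x :: xs, b => x ∈ pvSuccs tree a ∧ pvWk tree x xs b

theorem pvWk_snoc (tree : List (Int × List Int)) (a x n : Int) (xs : List Int)
    (h : pvWk tree a xs x) (hn : n ∈ pvSuccs tree x) : pvWk tree a (xs ++ [x]) n := by
  induction xs generalizing a with
  | nil => exact ⟨h, hn⟩
  | cons y ys ih => exact ⟨h.1, ih y h.2⟩

theorem pvChain_split (tree : List (Int × List Int)) :
    ∀ (p : List Int) (a : Int) (q : List Int) (n : Int),
      pvChainUp tree (p ++ a :: q) n → pvWk tree a p.reverse n := by
  intro p
  induction p with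
  | nil => intro a q n h; exact h.1
  | cons x p' ih =>
    intro a q n h
    have hx : n ∈ pvSuccs tree x := h.1
    have hw : pvWk tree a p'.reverse x := ih a q x h.2
    simpa using pvWk_snoc tree a x n p'.reverse hw hx

theorem pvFrontier_step (tree : List (Int × List Int)) (i : Nat) (a b c : Int)
    (hb : b ∈ pvFrontier tree i a) (hc : c ∈ pvSuccs tree b) :
    c ∈ pvFrontier tree (i + 1) a := by
  simp only [pvFrontier, List.mem_dedup, List.mem_flatMap]
  exact ⟨b, hb, hc⟩

theorem pvFrontier_succs_sub (tree : List (Int × List Int)) (a x : Int)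
    (hx : x ∈ pvSuccs tree a) :
    ∀ (i : Nat) (b : Int), b ∈ pvFrontier tree i x → b ∈ pvFrontier tree (i + 1) a := by
  intro i
  induction i with
  | zero =>
    intro b hb
    simp only [pvFrontier, List.mem_singleton] at hb
    subst hb
    exact pvFrontier_step tree 0 a a b (by simp [pvFrontier]) hx
  | succ i ih =>
    intro b hb
    simp only [pvFrontier, List.mem_dedup, List.mem_flatMap] at hb
    obtain ⟨y, hy, hby⟩ := hb
    exact pvFrontier_step tree (i + 1) a y b (ih y hy) hby

theorem pvWk_frontier (tree : List (Int × List Int)) :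
    ∀ (xs : List Int) (a b : Int), pvWk tree a xs b → b ∈ pvFrontier tree (xs.length + 1) a := by
  intro xs
  induction xs with
  | nil =>
    intro a b h
    exact pvFrontier_step tree 0 a a b (by simp [pvFrontier]) h
  | cons x xs ih =>
    intro a b h
    exact pvFrontier_succs_sub tree a x h.1 (xs.length + 1) b (ih x b h.2)

theorem pvSuccs_mem_key (tree : List (Int × List Int)) (a n : Int)
    (h : n ∈ pvSuccs tree a) : ∃ cs, (PySem.Dict.mk tree).get? a = some cs := by
  unfold pvSuccs at h
  cases hg : (PySem.Dict.mk tree).get? a with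
  | none => rw [hg] at h; simp at h
  | some cs => exact ⟨cs, rfl⟩

theorem pvChain_keys (tree : List (Int × List Int)) :
    ∀ (anc : List Int) (n : Int), pvChainUp tree anc n →
      ∀ a ∈ anc, a ∈ tree.map Prod.fst := by
  intro anc
  induction anc with
  | nil => intro n _ a ha; simp at ha
  | cons x anc ih =>
    intro n h a ha
    rcases List.mem_cons.mp ha with rfl | ha
    · obtain ⟨cs, hcs⟩ := pvSuccs_mem_key tree a n h.1
      have hmem : (a, cs) ∈ tree := PySem.Dict.mem_items_of_get?_eq_some _ hcs
      exact List.mem_map.mpr ⟨(a, cs), hmem, rfl⟩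
    · exact ih x h.2 a ha

theorem pvNodup_len (l l' : List Int) (hnd : l.Nodup) (hsub : l ⊆ l') :
    l.length ≤ l'.length :=
  (List.subperm_of_subset hnd hsub).length_le

-- Under Pre_, fuel `tree.length + 1` suffices for A's recursion at any node of the
-- recursion tree (`anc` = path of ancestors, nearest first, ending at `root`).
theorem pvOk_of_pre (root : Int) (tree : List (Int × List Int))
    (hpre : Pre_get_ordered_leaves root tree) :
    ∀ (f : Nat) (anc : List Int) (n : Int),
      pvChainUp tree anc n → anc.Nodup →
      (anc = [] → n = root) → (anc ≠ [] → anc.getLast? = some root) →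
      tree.length + 1 ≤ f + anc.length → pvOk tree f n = true := by
  intro f
  induction f with
  | zero =>
    intro anc n hch hnd _ _ hlen
    have hsub : anc ⊆ tree.map Prod.fst := fun a ha => pvChain_keys tree anc n hch a ha
    have := pvNodup_len anc (tree.map Prod.fst) hnd hsub
    simp at this
    omega
  | succ f ih =>
    intro anc n hch hnd hroot hlast hlen
    cases hg : (PySem.Dict.mk tree).get? n with
    | none => simp [pvOk, hg]
    | some cs =>
      -- n is reachable from root
      have hkeysub : anc ⊆ tree.map Prod.fst := fun a ha => pvChain_keys tree anc n hch a ha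
      have hanclen : anc.length ≤ tree.length := by
        have := pvNodup_len anc (tree.map Prod.fst) hnd hkeysub
        simpa using this
      have hreach : n ∈ pvReach tree root := by
        cases hanc : anc with
        | nil =>
          have : n = root := hroot hanc
          subst this
          exact List.mem_flatMap.mpr ⟨0, by simp, by simp [pvFrontier]⟩
        | cons a0 anc' =>
          -- anc = dropLast ++ [root]; walk root → … → n of length anc.length
          subst hanc
          have hne : (a0 :: anc') ≠ [] := by simp
          have hlastr : (a0 :: anc').getLast? = some root := hlast hne
          obtain ⟨p, hp⟩ : ∃ p, a0 :: anc' = p ++ [root] := by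
            have := List.getLast?_eq_some_iff.mp hlastr
            simpa using this
          have hwk : pvWk tree root p.reverse n := by
            have : pvChainUp tree (p ++ root :: []) n := by rw [← hp]; exact hch
            exact pvChain_split tree p root [] n this
          have hmem := pvWk_frontier tree p.reverse root n hwk
          have hplen : p.length + 1 ≤ tree.length := by
            have h1 : (a0 :: anc').length = p.length + 1 := by rw [hp]; simp
            have h2 : (a0 :: anc').length ≤ tree.length := hanclen
            omega
          refine List.mem_flatMap.mpr ⟨p.length + 1, ?_, by simpa using hmem⟩
          simp only [List.mem_range]
          omega

      -- n itself is a key on a short cycle if n ∈ anc: contradiction with Pre_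
      have hnotmem : n ∉ anc := by
        intro hmem
        obtain ⟨p, q, hpq⟩ := List.append_of_mem hmem
        have hch' : pvChainUp tree (p ++ n :: q) n := by rw [← hpq]; exact hch
        have hwk : pvWk tree n p.reverse n := pvChain_split tree p n q n hch'
        have hfr : n ∈ pvFrontier tree (p.length + 1) n := by
          simpa using pvWk_frontier tree p.reverse n n hwk
        have hkey : (n, cs) ∈ tree := PySem.Dict.mem_items_of_get?_eq_some _ hg
        have hplen : p.length < tree.length := by
          have : anc.length = p.length + 1 + q.length := by rw [hpq]; simp; omega
          omega
        exact hpre (n, cs) hkey hreach p.length (List.mem_range.mpr hplen) hfr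
      -- recurse into children
      simp only [pvOk, hg, List.all_eq_true]
      intro c hc
      refine ih (n :: anc) c ⟨?_, hch⟩ (List.nodup_cons.mpr ⟨hnotmem, hnd⟩) (by simp) ?_ ?_
      · unfold pvSuccs; rw [hg]; simpa using hc
      · intro _
        cases hanc : anc with
        | nil => simp [hroot hanc]
        | cons a0 anc' => rw [List.getLast?_cons_cons, ← hanc]; exact hlast (by simp [hanc])
      · simp; omega

-- B's loop run on `n :: rest` with `pvCost f n` extra fuel first produces exactly
-- A's recursion at `n`, then continues with `rest`.
theorem pvBridge (tree : List (Int × List Int)) :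
    ∀ (f : Nat) (n : Int), pvOk tree f n = true →
      ∀ (g : Nat) (rest leaves : List Int),
        pvLeavesLoop tree (pvCost tree f n + g) (n :: rest) leaves
          = pvLeavesLoop tree g rest (pvLeavesRec tree f n leaves) := by
  intro f
  induction f with
  | zero => intro n h; simp [pvOk] at h
  | succ f ih =>
    intro n h g rest leaves
    cases hg : (PySem.Dict.mk tree).get? n with
    | none =>
      have hc : pvCost tree (f + 1) n = 1 := by simp [pvCost, hg]
      rw [hc]
      have : 1 + g = g + 1 := by omega
      rw [this]
      simp [pvLeavesLoop, pvLeavesRec, hg]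
    | some cs =>
      have hall : ∀ c ∈ cs, pvOk tree f c = true := by
        have := h
        simp only [pvOk, hg, List.all_eq_true] at this
        exact this
      have hc : pvCost tree (f + 1) n = (cs.map (pvCost tree f)).sum + 1 := by
        simp [pvCost, hg]
      rw [hc]
      have harr : (cs.map (pvCost tree f)).sum + 1 + g = ((cs.map (pvCost tree f)).sum + g) + 1 := by omega
      rw [harr]
      simp only [pvLeavesLoop, hg, pvLeavesRec]
      -- inner loop over the children list
      have inner : ∀ (cs' : List Int), (∀ c ∈ cs', pvOk tree f c = true) →
          ∀ (g : Nat) (rest leaves : List Int),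
            pvLeavesLoop tree ((cs'.map (pvCost tree f)).sum + g) (cs' ++ rest) leaves
              = pvLeavesLoop tree g rest (cs'.foldl (fun acc n => pvLeavesRec tree f n acc) leaves) := by
        intro cs'
        induction cs' with
        | nil => intro _ g rest leaves; simp
        | cons c cs' ihc =>
          intro hall' g rest leaves
          have harr2 : ((c :: cs').map (pvCost tree f)).sum + g
              = pvCost tree f c + ((cs'.map (pvCost tree f)).sum + g) := by
            simp; omega
          rw [harr2]
          rw [show ((c :: cs') ++ rest) = c :: (cs' ++ rest) by simp]
          rw [ih c (hall' c (by simp)) ((cs'.map (pvCost tree f)).sum + g) (cs' ++ rest) leaves]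
          rw [ihc (fun c' hc' => hall' c' (by simp [hc'])) g rest (pvLeavesRec tree f c leaves)]
          simp [List.foldl_cons]
      exact inner cs hall g rest leaves

-- ===== VERDICT (by name: the statement is the Claim_ definition above) =====
theorem get_ordered_leaves_spec : Claim_equal_get_ordered_leaves := by
  intro root tree _ hpre
  unfold Spec_get_ordered_leaves get_ordered_leaves get_ordered_leaves_alt
  have hok : pvOk tree (tree.length + 1) root = true :=
    pvOk_of_pre root tree hpre (tree.length + 1) [] root trivial List.nodup_nil
      (fun _ => rfl) (fun h => absurd rfl h) (by simp)
  have := pvBridge tree (tree.length + 1) root hok 0 [] []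
  rw [Nat.add_zero] at this
  rw [this]
  cases h : pvCost tree 0 root <;> rfl
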